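-- pv_equiv track=rewrite | github.com/pypi-data/pypi-mirror-392 | packages/ui-tars/ui_tars-0.3.10.tar.gz/ui_tars-0.3.10/ui_tars/1.py | add_backslash_before_newline
-- ===== SOURCE A (Python) =====
-- def add_backslash_before_newline(s):
--     result = []
--     for i in range(len(s)):
--         if s[i] == '\n':
--             # 如果当前字符是 '\n'，并且前一个字符不是 '\'
--             if i == 0 or s[i - 1] != '\\':
--                 result.append('\\')  # 在 '\n' 前添加 '\'
--         result.append(s[i])
--     return ''.join(result)
-- ===== SOURCE B (Python) =====
-- def add_backslash_before_newline(s):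
--     # Two-char consuming scanner: an already-escaped "\\\n" pair is copied as a
--     # unit; any other "\n" gets a backslash inserted before it.
--     out = []
--     i = 0
--     n = len(s)
--     while i < n:
--         c = s[i]
--         if c == '\\' and i + 1 < n and s[i + 1] == '\n':
--             out.append('\\\n')
--             i += 2
--         elif c == '\n':
--             out.append('\\\n')
--             i += 1
--         else:
--             out.append(c)
--             i += 1
--     return ''.join(out)
-- ===== Notes on version B (the rewrite author's own statement) =====
-- stated objective: alternative
-- what changed: Replaces the per-index loop with lookbehind (checking s[i-1] for each newline) by a two-character consuming scanner that copies an already-escaped backslash-newline pair as a unit and otherwise escapes each newline, needing no lookbehind state.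
import Mathlib
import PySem

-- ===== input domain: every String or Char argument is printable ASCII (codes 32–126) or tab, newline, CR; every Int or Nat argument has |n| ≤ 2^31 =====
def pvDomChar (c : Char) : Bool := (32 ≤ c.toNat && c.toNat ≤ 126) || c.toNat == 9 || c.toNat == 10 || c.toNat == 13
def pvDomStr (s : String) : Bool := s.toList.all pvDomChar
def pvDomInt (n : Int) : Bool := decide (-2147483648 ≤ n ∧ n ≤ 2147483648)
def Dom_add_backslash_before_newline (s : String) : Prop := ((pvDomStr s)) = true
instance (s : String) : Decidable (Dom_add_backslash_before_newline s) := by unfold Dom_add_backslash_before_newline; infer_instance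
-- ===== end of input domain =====

-- B replaces A's index loop with lookbehind by a two-character consuming scanner (alternative decomposition, same cost).


-- ===== PORT A =====
-- for i in range(len(s)): if s[i]=='\n' and (i==0 or s[i-1]!='\\'): append '\\'; append s[i].
-- s[i] / s[i-1] are ported with pyGetD: every index the loop reads is in range
-- (the i-1 read is guarded by `i == 0 or`, which short-circuits in Python and
-- whose pyGetD value is unused here when i = 0), so the default is never the value.
def add_backslash_before_newline (s : String) : String :=
  let cs := s.toList
  let result := (PySem.List.pyRange 0 (cs.length : Int) 1).foldl (fun r i =>
    let r := if PySem.List.pyGetD cs i ' ' = '\n' ∧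
                (i = 0 ∨ PySem.List.pyGetD cs (i - 1) ' ' ≠ '\\')
             then r ++ ['\\'] else r
    r ++ [PySem.List.pyGetD cs i ' ']) []
  String.mk result

-- ===== PORT B =====
-- Source B's while loop consumes one or two characters per step; as structural recursion:
def pvGoB : List Char → List Char
  | [] => []
  | [a] => if a = '\n' then ['\\', '\n'] else [a]
  | a :: b :: t =>
    if a = '\\' ∧ b = '\n' then '\\' :: '\n' :: pvGoB t
    else if a = '\n' then '\\' :: '\n' :: pvGoB (b :: t)
    else a :: pvGoB (b :: t)

def add_backslash_before_newline_alt (s : String) : String :=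
  String.mk (pvGoB s.toList)

-- ===== PRECONDITION & SPEC =====
def Spec_add_backslash_before_newline (s : String) (out : String) : Prop := out = add_backslash_before_newline_alt s
instance (s : String) (out : String) : Decidable (Spec_add_backslash_before_newline s out) := by unfold Spec_add_backslash_before_newline; infer_instance

-- ===== CLAIM (what is proved, stated in full; the proofs are below) =====
def Claim_equal_add_backslash_before_newline : Prop := ∀ (s : String), Dom_add_backslash_before_newline s → Spec_add_backslash_before_newline s (add_backslash_before_newline s)

-- ===== LEMMAS AND PROOFS =====

-- A's loop with the lookbehind made explicit: prev is the character just before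
-- the current suffix (none at the start of the string).
def pvLoopA (t : List Char) (prev : Option Char) : List Char :=
  match t with
  | [] => []
  | c :: t' =>
    (if c = '\n' ∧ prev ≠ some '\\' then ['\\', c] else [c]) ++ pvLoopA t' (some c)

-- the character A reads at index pre.length of pre ++ c :: t is c
theorem pvGet_here (pre : List Char) (c : Char) (t : List Char) :
    PySem.List.pyGetD (pre ++ c :: t) (pre.length : Int) ' ' = c := by
  rw [PySem.List.pyGetD_natCast]
  simp [List.getD]

-- A's lookbehind condition says exactly "the previous character is not a backslash"
theorem pvCond (pre : List Char) (c : Char) (t : List Char) :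
    (((pre.length : Int) = 0 ∨
       PySem.List.pyGetD (pre ++ c :: t) ((pre.length : Int) - 1) ' ' ≠ '\\'))
      ↔ pre.getLast? ≠ some '\\' := by
  cases pre with
  | nil => simp
  | cons x xs =>
    have hne : (x :: xs : List Char) ≠ [] := by simp
    have hcast : (((x :: xs : List Char).length : Int)) - 1 = (((x :: xs : List Char).length - 1 : Nat) : Int) := by
      push_cast [List.length_cons]; ring
    rw [hcast, PySem.List.pyGetD_natCast]
    rw [List.getD_eq_getElem _ _ (by simp)]
    rw [List.getElem_append_left (by simp)]
    rw [List.getLast?_eq_some_getLast hne]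
    simp [List.getLast_eq_getElem]
    intro h; omega

-- one iteration of A's fold body equals one step of pvLoopA
theorem pvStepA (pre : List Char) (c : Char) (t rr : List Char) :
    (let r := if PySem.List.pyGetD (pre ++ c :: t) (pre.length : Int) ' ' = '\n' ∧
                  ((pre.length : Int) = 0 ∨
                    PySem.List.pyGetD (pre ++ c :: t) ((pre.length : Int) - 1) ' ' ≠ '\\')
              then rr ++ ['\\'] else rr
     r ++ [PySem.List.pyGetD (pre ++ c :: t) (pre.length : Int) ' '])
    = rr ++ (if c = '\n' ∧ pre.getLast? ≠ some '\\' then ['\\', c] else [c]) := by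
  rw [pvGet_here]
  rw [if_congr (and_congr_right fun _ => pvCond pre c t) rfl rfl]
  by_cases h : c = '\n' ∧ pre.getLast? ≠ some '\\' <;> simp [h]

-- A's fold over the remaining indices produces pvLoopA of the remaining suffix
theorem pvFoldA (t : List Char) : ∀ (pre r : List Char) (s : List Char), s = pre ++ t →
    (PySem.List.pyRange (pre.length : Int) (s.length : Int) 1).foldl (fun r i =>
      let r := if PySem.List.pyGetD s i ' ' = '\n' ∧
                  (i = 0 ∨ PySem.List.pyGetD s (i - 1) ' ' ≠ '\\')
               then r ++ ['\\'] else r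
      r ++ [PySem.List.pyGetD s i ' ']) r
    = r ++ pvLoopA t pre.getLast? := by
  induction t with
  | nil =>
    intro pre r s hs
    subst hs
    simp [pvLoopA, PySem.List.pyRange_one_eq_nil]
  | cons c t ih =>
    intro pre r s hs
    subst hs
    rw [PySem.List.pyRange_one_cons (by simp)]
    rw [List.foldl_cons, pvStepA]
    have h1 : pre ++ c :: t = (pre ++ [c]) ++ t := by simp
    have h2 : (pre.length : Int) + 1 = ((pre ++ [c]).length : Int) := by simp
    rw [h2, h1, ih (pre ++ [c]) _ _ rfl]
    simp [pvLoopA, List.append_assoc]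

-- pvLoopA with a safe lookbehind state equals B's two-character scanner
theorem pvLoopA_eq_goB (t : List Char) : ∀ (p : Option Char),
    (p = some '\\' → t.head? ≠ some '\n') → pvLoopA t p = pvGoB t := by
  induction t using pvGoB.induct with
  | case1 => intro p _; rfl
  | case2 =>
    intro p hp
    have hpne : p ≠ some '\\' := fun h => (hp h) (by simp)
    simp [pvLoopA, pvGoB, hpne]
  | case3 a ha =>
    intro p hp
    simp [pvLoopA, pvGoB, ha]
  | case4 a b t hab ih =>
    intro p hp
    obtain ⟨ha, hb⟩ := hab
    subst ha; subst hb
    have h1 : pvLoopA ('\\' :: '\n' :: t) p = '\\' :: pvLoopA ('\n' :: t) (some '\\') := by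
      simp [pvLoopA]
    have h2 : pvLoopA ('\n' :: t) (some '\\') = '\n' :: pvLoopA t (some '\n') := by
      simp [pvLoopA]
    rw [h1, h2, ih (some '\n') (by intro h; simp at h)]
    rw [pvGoB]
    simp
  | case5 b t hab ih =>
    intro p hp
    have hpne : p ≠ some '\\' := fun h => (hp h) (by simp)
    have h1 : pvLoopA ('\n' :: b :: t) p = '\\' :: '\n' :: pvLoopA (b :: t) (some '\n') := by
      simp [pvLoopA, hpne]
    rw [h1, ih (some '\n') (by intro h; simp at h)]
    rw [pvGoB]
    simp
  | case6 a b t hab ha ih =>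
    intro p hp
    have h1 : pvLoopA (a :: b :: t) p = a :: pvLoopA (b :: t) (some a) := by
      simp [pvLoopA, ha]
    rw [h1, ih (some a) (by
      intro h hbn
      injection h with h
      injection hbn with hbn
      exact hab ⟨h, hbn⟩)]
    rw [pvGoB]
    simp [hab, ha]

-- ===== VERDICT (by name: the statement is the Claim_ definition above) =====
theorem add_backslash_before_newline_spec : Claim_equal_add_backslash_before_newline := by
  intro s _
  unfold Spec_add_backslash_before_newline
  simp only [add_backslash_before_newline, add_backslash_before_newline_alt]
  have h := pvFoldA s.toList [] [] s.toList (by simp)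
  simp only [List.length_nil, Nat.cast_zero, List.nil_append, List.getLast?_nil] at h
  rw [h, pvLoopA_eq_goB s.toList none (by simp)]
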